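-- pv_equiv track=rewrite | github.com/KevSage/Bass-Fishing_Plans | apps/api/app/services/plan_enrichment.py | build_gear_for_lure
-- ===== SOURCE A (Python) =====
-- from typing import Any, Dict, List, Tuple
--
-- PRESENTATION_TO_FAMILY = {
--     "Surface Chase": "surface_chase",
--     "Surface Ambush": "surface_ambush",
--     "Horizontal Reaction": "horizontal_moving",
--     "Slow Roll / Glide": "slow_roll_glide",
--     "Bottom Contact - Dragging": "bottom_dragging",
--     "Bottom Contact - Lift/Drop": "bottom_lift_drop",
--     "Vertical Reaction": "vertical_hover",
--     "Hovering / Mid-Column Finesse": "vertical_hover",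
-- }
--
-- def get_presentation_family(presentation: str) -> str:
--     return PRESENTATION_TO_FAMILY.get(presentation, "horizontal_moving")
--
-- def build_gear_for_lure(lure: str, presentation: str) -> Dict[str, str]:
--     """
--     Generate gear recommendations based on lure and presentation.
--     Returns: {rod, reel, line, technique}
--     """
--     family = get_presentation_family(presentation)
--     lure_lower = lure.lower()
--
--     # Finesse/vertical presentations
--     if family == "vertical_hover" or any(x in lure_lower for x in ["dropshot", "damiki", "ned rig", "shaky head", "neko rig", "wacky rig"]):
--         return {
--             "rod": '7\'0" medium spinning',
--             "reel": "2500 spinning",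
--             "line": "10 lb braid to 8 lb fluorocarbon leader",
--             "technique": "spinning"
--         }
--
--     # Bottom contact
--     if family in ("bottom_dragging", "bottom_lift_drop") or any(x in lure_lower for x in ["jig", "carolina", "texas"]):
--         return {
--             "rod": '7\'1" medium-heavy casting',
--             "reel": "7.3:1 baitcaster",
--             "line": "15-17 lb fluorocarbon",
--             "technique": "casting"
--         }
--
--     # Topwater
--     if family in ("surface_chase", "surface_ambush") or any(x in lure_lower for x in ["frog", "buzzbait", "plopper", "popper", "walking bait"]):
--         return {
--             "rod": '7\'0" medium-heavy casting',
--             "reel": "7.3-8.1:1 baitcaster",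
--             "line": "30-50 lb braid",
--             "technique": "casting"
--         }
--
--     # Moving/horizontal default
--     return {
--         "rod": '7\'0" medium-heavy casting',
--         "reel": "7.1:1 baitcaster",
--         "line": "15 lb fluorocarbon",
--         "technique": "casting"
--     }
-- ===== SOURCE B (Python) =====
-- from typing import Dict, List
--
-- PRESENTATION_TO_FAMILY = {
--     "Surface Chase": "surface_chase",
--     "Surface Ambush": "surface_ambush",
--     "Horizontal Reaction": "horizontal_moving",
--     "Slow Roll / Glide": "slow_roll_glide",
--     "Bottom Contact - Dragging": "bottom_dragging",
--     "Bottom Contact - Lift/Drop": "bottom_lift_drop",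
--     "Vertical Reaction": "vertical_hover",
--     "Hovering / Mid-Column Finesse": "vertical_hover",
-- }
--
-- # Priority scores: 0 = finesse/vertical, 1 = bottom contact, 2 = topwater, 3 = default moving.
-- FAMILY_PRIORITY: Dict[str, int] = {
--     "vertical_hover": 0,
--     "bottom_dragging": 1,
--     "bottom_lift_drop": 1,
--     "surface_chase": 2,
--     "surface_ambush": 2,
-- }
--
-- KEYWORD_PRIORITY: Dict[str, int] = {
--     "dropshot": 0, "damiki": 0, "ned rig": 0, "shaky head": 0, "neko rig": 0, "wacky rig": 0,
--     "jig": 1, "carolina": 1, "texas": 1,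
--     "frog": 2, "buzzbait": 2, "plopper": 2, "popper": 2, "walking bait": 2,
-- }
--
-- GEARS: List[Dict[str, str]] = [
--     {"rod": '7\'0" medium spinning',
--      "reel": "2500 spinning",
--      "line": "10 lb braid to 8 lb fluorocarbon leader",
--      "technique": "spinning"},
--     {"rod": '7\'1" medium-heavy casting',
--      "reel": "7.3:1 baitcaster",
--      "line": "15-17 lb fluorocarbon",
--      "technique": "casting"},
--     {"rod": '7\'0" medium-heavy casting',
--      "reel": "7.3-8.1:1 baitcaster",
--      "line": "30-50 lb braid",
--      "technique": "casting"},
--     {"rod": '7\'0" medium-heavy casting',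
--      "reel": "7.1:1 baitcaster",
--      "line": "15 lb fluorocarbon",
--      "technique": "casting"},
-- ]
--
-- def build_gear_for_lure(lure: str, presentation: str) -> Dict[str, str]:
--     family = PRESENTATION_TO_FAMILY.get(presentation, "horizontal_moving")
--     lure_lower = lure.lower()
--     priority = min(FAMILY_PRIORITY.get(family, 3),
--                    min((p for kw, p in KEYWORD_PRIORITY.items() if kw in lure_lower),
--                        default=3))
--     return dict(GEARS[priority])
-- ===== Notes on version B (the rewrite author's own statement) =====
-- stated objective: alternative
-- what changed: Replaces A's ordered if/elif branch chain by a scoring scheme: two priority dicts (family->score, keyword->score) and a min over the scores of all matching keywords select an index into a gear table, so no sequential first-match control flow remains.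
import Mathlib
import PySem

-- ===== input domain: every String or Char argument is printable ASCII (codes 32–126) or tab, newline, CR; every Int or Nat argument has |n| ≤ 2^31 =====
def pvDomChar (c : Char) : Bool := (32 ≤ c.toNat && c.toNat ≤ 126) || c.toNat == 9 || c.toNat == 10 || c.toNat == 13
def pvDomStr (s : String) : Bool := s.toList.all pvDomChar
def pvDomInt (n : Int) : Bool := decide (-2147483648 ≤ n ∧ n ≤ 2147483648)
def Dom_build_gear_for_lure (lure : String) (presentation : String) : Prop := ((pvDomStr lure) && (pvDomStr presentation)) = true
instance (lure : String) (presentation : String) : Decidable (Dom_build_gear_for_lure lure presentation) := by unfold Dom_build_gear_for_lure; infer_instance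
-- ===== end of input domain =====

-- B replaces A's ordered branch chain by a min-of-scores selection into a gear table
-- (alternative decomposition, same cost). Return value only (Python returns a fresh dict).

-- ===== PORT A =====
def PRESENTATION_TO_FAMILY : PySem.Dict String String := PySem.Dict.ofList [
  ("Surface Chase", "surface_chase"),
  ("Surface Ambush", "surface_ambush"),
  ("Horizontal Reaction", "horizontal_moving"),
  ("Slow Roll / Glide", "slow_roll_glide"),
  ("Bottom Contact - Dragging", "bottom_dragging"),
  ("Bottom Contact - Lift/Drop", "bottom_lift_drop"),
  ("Vertical Reaction", "vertical_hover"),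
  ("Hovering / Mid-Column Finesse", "vertical_hover")]

def get_presentation_family (presentation : String) : String :=
  PRESENTATION_TO_FAMILY.getD presentation "horizontal_moving"

def build_gear_for_lure (lure : String) (presentation : String) : List (String × String) :=
  let family := get_presentation_family presentation
  let lure_lower := PySem.Str.lower lure
  if family == "vertical_hover" ||
      (["dropshot", "damiki", "ned rig", "shaky head", "neko rig", "wacky rig"].any
        (fun x => PySem.Str.isIn x lure_lower)) then
    [("rod", "7'0\" medium spinning"), ("reel", "2500 spinning"),
     ("line", "10 lb braid to 8 lb fluorocarbon leader"), ("technique", "spinning")]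
  else if (family == "bottom_dragging" || family == "bottom_lift_drop") ||
      (["jig", "carolina", "texas"].any (fun x => PySem.Str.isIn x lure_lower)) then
    [("rod", "7'1\" medium-heavy casting"), ("reel", "7.3:1 baitcaster"),
     ("line", "15-17 lb fluorocarbon"), ("technique", "casting")]
  else if (family == "surface_chase" || family == "surface_ambush") ||
      (["frog", "buzzbait", "plopper", "popper", "walking bait"].any
        (fun x => PySem.Str.isIn x lure_lower)) then
    [("rod", "7'0\" medium-heavy casting"), ("reel", "7.3-8.1:1 baitcaster"),
     ("line", "30-50 lb braid"), ("technique", "casting")]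
  else
    [("rod", "7'0\" medium-heavy casting"), ("reel", "7.1:1 baitcaster"),
     ("line", "15 lb fluorocarbon"), ("technique", "casting")]

-- ===== PORT B =====
-- priority scores: 0 = finesse/vertical, 1 = bottom contact, 2 = topwater, 3 = default
def FAMILY_PRIORITY : PySem.Dict String Nat := PySem.Dict.ofList [
  ("vertical_hover", 0), ("bottom_dragging", 1), ("bottom_lift_drop", 1),
  ("surface_chase", 2), ("surface_ambush", 2)]

def KEYWORD_PRIORITY : List (String × Nat) := [
  ("dropshot", 0), ("damiki", 0), ("ned rig", 0), ("shaky head", 0), ("neko rig", 0), ("wacky rig", 0),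
  ("jig", 1), ("carolina", 1), ("texas", 1),
  ("frog", 2), ("buzzbait", 2), ("plopper", 2), ("popper", 2), ("walking bait", 2)]

def GEARS : List (List (String × String)) := [
  [("rod", "7'0\" medium spinning"), ("reel", "2500 spinning"),
   ("line", "10 lb braid to 8 lb fluorocarbon leader"), ("technique", "spinning")],
  [("rod", "7'1\" medium-heavy casting"), ("reel", "7.3:1 baitcaster"),
   ("line", "15-17 lb fluorocarbon"), ("technique", "casting")],
  [("rod", "7'0\" medium-heavy casting"), ("reel", "7.3-8.1:1 baitcaster"),
   ("line", "30-50 lb braid"), ("technique", "casting")],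
  [("rod", "7'0\" medium-heavy casting"), ("reel", "7.1:1 baitcaster"),
   ("line", "15 lb fluorocarbon"), ("technique", "casting")]]

def build_gear_for_lure_alt (lure : String) (presentation : String) : List (String × String) :=
  let family := PRESENTATION_TO_FAMILY.getD presentation "horizontal_moving"
  let lure_lower := PySem.Str.lower lure
  -- min(generator over matching keywords, default=3): fold min over the matching scores
  let kwMin := ((KEYWORD_PRIORITY.filter (fun kv => PySem.Str.isIn kv.1 lure_lower)).map
      Prod.snd).foldl Nat.min 3
  let priority := Nat.min (FAMILY_PRIORITY.getD family 3) kwMin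
  GEARS.getD priority []

-- ===== PRECONDITION & SPEC =====
def Spec_build_gear_for_lure (lure : String) (presentation : String) (out : List (String × String)) : Prop := out = build_gear_for_lure_alt lure presentation
instance (lure : String) (presentation : String) (out : List (String × String)) : Decidable (Spec_build_gear_for_lure lure presentation out) := by unfold Spec_build_gear_for_lure; infer_instance

-- ===== CLAIM (what is proved, stated in full; the proofs are below) =====
def Claim_equal_build_gear_for_lure : Prop := ∀ (lure : String) (presentation : String), Dom_build_gear_for_lure lure presentation → Spec_build_gear_for_lure lure presentation (build_gear_for_lure lure presentation)

-- ===== LEMMAS AND PROOFS =====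

theorem pv_foldl_min_all_eq (k : Nat) : ∀ (l : List Nat) (a : Nat), (∀ x ∈ l, x = k) →
    l.foldl Nat.min a = if l = [] then a else Nat.min a k
  | [], a, _ => by simp
  | x :: t, a, h => by
    have hx : x = k := h x (by simp)
    have ht : ∀ y ∈ t, y = k := fun y hy => h y (by simp [hy])
    have := pv_foldl_min_all_eq k t (Nat.min a x) ht
    subst hx
    simp only [List.foldl_cons, this]
    rcases t with _ | _ <;> simp [Nat.min_assoc]

theorem pv_fam (f : String) : FAMILY_PRIORITY.getD f 3 =
    (if f == "vertical_hover" then 0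
     else if f == "bottom_dragging" || f == "bottom_lift_drop" then 1
     else if f == "surface_chase" || f == "surface_ambush" then 2 else 3) := by
  have e : ∀ (a : String), ¬ f = a → ((a == f) = false) := fun a h => by
    have h' : ¬ a = f := fun hh => h hh.symm
    simp [beq_iff_eq, h']
  rw [show FAMILY_PRIORITY = PySem.Dict.mk [("vertical_hover", 0), ("bottom_dragging", 1),
    ("bottom_lift_drop", 1), ("surface_chase", 2), ("surface_ambush", 2)] from rfl]
  by_cases h1 : f = "vertical_hover"
  · subst h1; decide
  by_cases h2 : f = "bottom_dragging"
  · subst h2; decide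
  by_cases h3 : f = "bottom_lift_drop"
  · subst h3; decide
  by_cases h4 : f = "surface_chase"
  · subst h4; decide
  by_cases h5 : f = "surface_ambush"
  · subst h5; decide
  simp [PySem.Dict.getD, PySem.Dict.get?, PySem.Dict.items, List.find?,
    e _ h1, e _ h2, e _ h3, e _ h4, e _ h5, beq_iff_eq, h1, h2, h3, h4, h5]

-- ===== VERDICT (by name: the statement is the Claim_ definition above) =====
set_option maxHeartbeats 2000000 in
set_option maxRecDepth 8192 in
theorem build_gear_for_lure_spec : Claim_equal_build_gear_for_lure := by
  intro lure presentation _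
  unfold Spec_build_gear_for_lure
  unfold build_gear_for_lure build_gear_for_lure_alt get_presentation_family
  generalize PySem.Str.lower lure = s
  generalize PRESENTATION_TO_FAMILY.getD presentation "horizontal_moving" = f
  rw [show KEYWORD_PRIORITY =
    ([("dropshot", 0), ("damiki", 0), ("ned rig", 0), ("shaky head", 0), ("neko rig", 0), ("wacky rig", 0)] : List (String × Nat)) ++
    ([("jig", 1), ("carolina", 1), ("texas", 1)] ++
     [("frog", 2), ("buzzbait", 2), ("plopper", 2), ("popper", 2), ("walking bait", 2)]) from rfl]
  simp only [List.filter_append, List.map_append, List.foldl_append]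
  rw [pv_foldl_min_all_eq 0 _ 3 (by intro x hx; simp at hx; omega)]
  rw [pv_foldl_min_all_eq 2 _ _ (by intro x hx; simp at hx; omega)]
  rw [pv_foldl_min_all_eq 1 _ _ (by intro x hx; simp at hx; omega)]
  have eA : (List.map Prod.snd (List.filter (fun kv => PySem.Str.isIn kv.1 s)
      [("dropshot", 0), ("damiki", 0), ("ned rig", 0), ("shaky head", 0), ("neko rig", 0), ("wacky rig", 0)]) = []) ↔
      ¬ ((["dropshot", "damiki", "ned rig", "shaky head", "neko rig", "wacky rig"].any
        (fun x => PySem.Str.isIn x s)) = true) := by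
    simp [List.filter_eq_nil_iff]
  have eB : (List.map Prod.snd (List.filter (fun kv => PySem.Str.isIn kv.1 s)
      [("jig", 1), ("carolina", 1), ("texas", 1)]) = []) ↔
      ¬ ((["jig", "carolina", "texas"].any (fun x => PySem.Str.isIn x s)) = true) := by
    simp [List.filter_eq_nil_iff]
  have eC : (List.map Prod.snd (List.filter (fun kv => PySem.Str.isIn kv.1 s)
      [("frog", 2), ("buzzbait", 2), ("plopper", 2), ("popper", 2), ("walking bait", 2)]) = []) ↔
      ¬ ((["frog", "buzzbait", "plopper", "popper", "walking bait"].any (fun x => PySem.Str.isIn x s)) = true) := by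
    simp [List.filter_eq_nil_iff]
  simp only [eA, eB, eC]
  by_cases hA : (["dropshot", "damiki", "ned rig", "shaky head", "neko rig", "wacky rig"].any
      (fun x => PySem.Str.isIn x s)) = true <;>
  by_cases hB : (["jig", "carolina", "texas"].any (fun x => PySem.Str.isIn x s)) = true <;>
  by_cases hC : (["frog", "buzzbait", "plopper", "popper", "walking bait"].any
      (fun x => PySem.Str.isIn x s)) = true <;>
  simp only [hA, hB, hC, not_true, not_false_iff, if_true, if_false, ite_true, ite_false,
    Bool.or_true, Bool.or_false] <;>
  rw [pv_fam f] <;>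
  by_cases c1 : (f == "vertical_hover") = true <;>
  by_cases c2 : (f == "bottom_dragging") = true <;>
  by_cases c3 : (f == "bottom_lift_drop") = true <;>
  by_cases c4 : (f == "surface_chase") = true <;>
  by_cases c5 : (f == "surface_ambush") = true <;>
  simp_all [GEARS]
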